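-- pv_equiv track=rewrite | github.com/JaneliaSciComp/tensorswitch | src/tensorswitch_v2/core/downsampler.py | calculate_cumulative_factors
-- ===== SOURCE A (Python) =====
-- from typing import Optional, List, Dict, Any, Tuple
--
-- def calculate_cumulative_factors(
--     per_level_factors: List[List[int]],
--     target_level: int
-- ) -> List[int]:
--     """
--     Calculate cumulative downsampling factors from s0 to target level.
--
--     This is the key function enabling parallel downsampling from s0.
--     Instead of applying factors sequentially (s0→s1, s1→s2), we multiply
--     all factors up to the target level to get a single cumulative factor.
--
--     Args:
--         per_level_factors: List of per-level downsampling factors.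
--             per_level_factors[0] = factors for s0→s1
--             per_level_factors[1] = factors for s1→s2
--             etc.
--         target_level: Target level to downsample to (1-indexed).
--             Level 1 = s1, Level 2 = s2, etc.
--
--     Returns:
--         List of cumulative factors for direct s0→s{target_level} downsampling.
--
--     Example:
--         >>> per_level_factors = [
--         ...     [1, 2, 2],  # s0→s1: no Z, 2x Y, 2x X
--         ...     [1, 2, 2],  # s1→s2: no Z, 2x Y, 2x X
--         ...     [2, 2, 2],  # s2→s3: 2x Z, 2x Y, 2x X (Z catches up)
--         ... ]
--         >>> calculate_cumulative_factors(per_level_factors, 1)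
--         [1, 2, 2]  # Direct s0→s1
--         >>> calculate_cumulative_factors(per_level_factors, 2)
--         [1, 4, 4]  # Direct s0→s2 (2*2 = 4)
--         >>> calculate_cumulative_factors(per_level_factors, 3)
--         [2, 8, 8]  # Direct s0→s3 (1*1*2=2 for Z, 2*2*2=8 for Y,X)
--     """
--     if target_level < 1:
--         raise ValueError(f"target_level must be >= 1, got {target_level}")
--     if target_level > len(per_level_factors):
--         raise ValueError(
--             f"target_level {target_level} exceeds available factors "
--             f"(max level: {len(per_level_factors)})"
--         )
--
--     # Start with identity factors
--     num_dims = len(per_level_factors[0])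
--     cumulative = [1] * num_dims
--
--     # Multiply factors for each level up to target
--     for level_idx in range(target_level):
--         for dim_idx in range(num_dims):
--             cumulative[dim_idx] *= per_level_factors[level_idx][dim_idx]
--
--     return cumulative
-- ===== SOURCE B (Python) =====
-- def calculate_cumulative_factors(per_level_factors, target_level):
--     if target_level < 1:
--         raise ValueError(f"target_level must be >= 1, got {target_level}")
--     if target_level > len(per_level_factors):
--         raise ValueError(
--             f"target_level {target_level} exceeds available factors "
--             f"(max level: {len(per_level_factors)})"
--         )
--     return _cumulative(per_level_factors, target_level)
--
--
-- def _cumulative(per_level_factors, level):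
--     """Cumulative factors for s0->s{level}, by recursion on the level."""
--     if level == 1:
--         return list(per_level_factors[0])
--     prev = _cumulative(per_level_factors, level - 1)
--     row = per_level_factors[level - 1]
--     return [c * f for c, f in zip(prev, row)]
-- ===== Notes on version B (the rewrite author's own statement) =====
-- stated objective: alternative
-- what changed: B replaces A's iterative double loop mutating a shared cumulative list with a recursion on the target level: the cumulative factors for level t are the factors for level t-1 multiplied elementwise by row t-1.
import Mathlib
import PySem

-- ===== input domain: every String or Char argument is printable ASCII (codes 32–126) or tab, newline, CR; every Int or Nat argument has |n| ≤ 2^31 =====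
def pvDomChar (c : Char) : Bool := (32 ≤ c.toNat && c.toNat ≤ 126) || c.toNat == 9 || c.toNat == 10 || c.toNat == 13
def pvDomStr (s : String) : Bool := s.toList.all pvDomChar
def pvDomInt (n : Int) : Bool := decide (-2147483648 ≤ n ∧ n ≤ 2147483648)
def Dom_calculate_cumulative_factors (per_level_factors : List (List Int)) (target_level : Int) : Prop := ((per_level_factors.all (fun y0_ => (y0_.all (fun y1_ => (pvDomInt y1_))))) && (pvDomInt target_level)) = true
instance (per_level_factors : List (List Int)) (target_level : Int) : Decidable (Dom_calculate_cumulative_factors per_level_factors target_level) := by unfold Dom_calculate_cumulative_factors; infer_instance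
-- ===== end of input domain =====

-- B replaces A's iterative double loop mutating a shared cumulative list by a recursion on the
-- target level: cumulative factors for level t = (factors for level t-1) *elementwise* row t-1 (alternative decomposition).


-- ===== PORT A =====
-- literal transliteration; the two ValueError branches and the ragged IndexError are excluded by Pre_
def calculate_cumulative_factors (per_level_factors : List (List Int)) (target_level : Int) : List Int :=
  if target_level < 1 then []          -- raise ValueError
  else if target_level > (per_level_factors.length : Int) then []   -- raise ValueError
  else
    -- num_dims = len(per_level_factors[0]) (nonempty under Pre_), inlined
    (PySem.List.pyRange 0 target_level 1).foldl
      (fun cumulative level_idx =>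
        (List.range (per_level_factors.headD []).length).foldl
          (fun cumulative dim_idx =>
            cumulative.set dim_idx
              (cumulative.getD dim_idx 1 *
                (PySem.List.pyGetD per_level_factors level_idx []).getD dim_idx 0))
          cumulative)
      (List.replicate (per_level_factors.headD []).length 1)

-- ===== PORT B =====
-- _cumulative: recursion on the level (level ≥ 1 and in range under Pre_; zip truncates)
def pvCumulative (per_level_factors : List (List Int)) : Nat → List Int
  | 0 => []                                    -- unreachable under the guards
  | 1 => per_level_factors.headD []            -- list(per_level_factors[0])
  | (k + 2) =>
    List.zipWith (· * ·) (pvCumulative per_level_factors (k + 1))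
      (per_level_factors.getD (k + 1) [])      -- per_level_factors[level-1]

def calculate_cumulative_factors_alt (per_level_factors : List (List Int)) (target_level : Int) : List Int :=
  if target_level < 1 then []          -- raise ValueError
  else if target_level > (per_level_factors.length : Int) then []   -- raise ValueError
  else pvCumulative per_level_factors target_level.toNat

-- ===== PRECONDITION & SPEC =====
-- Pre_ excludes exactly the inputs where A raises: target_level out of [1, len] (ValueError) and
-- ragged inputs where some of the first target_level rows is shorter than row 0 (IndexError).
def Pre_calculate_cumulative_factors (per_level_factors : List (List Int)) (target_level : Int) : Prop :=
  1 ≤ target_level ∧ target_level ≤ (per_level_factors.length : Int) ∧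
  ∀ row ∈ per_level_factors.take target_level.toNat,
    (per_level_factors.headD []).length ≤ row.length
instance (per_level_factors : List (List Int)) (target_level : Int) : Decidable (Pre_calculate_cumulative_factors per_level_factors target_level) := by unfold Pre_calculate_cumulative_factors; infer_instance

def pvWitness_calculate_cumulative_factors : List (List Int) × Int := ([[1, 2, 2], [1, 2, 2], [2, 2, 2]], 3)

def Spec_calculate_cumulative_factors (per_level_factors : List (List Int)) (target_level : Int) (out : List Int) : Prop := out = calculate_cumulative_factors_alt per_level_factors target_level
instance (per_level_factors : List (List Int)) (target_level : Int) (out : List Int) : Decidable (Spec_calculate_cumulative_factors per_level_factors target_level out) := by unfold Spec_calculate_cumulative_factors; infer_instance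

-- ===== CLAIM (what is proved, stated in full; the proofs are below) =====
def Claim_equal_calculate_cumulative_factors : Prop := ∀ (per_level_factors : List (List Int)) (target_level : Int), Dom_calculate_cumulative_factors per_level_factors target_level → Pre_calculate_cumulative_factors per_level_factors target_level → Spec_calculate_cumulative_factors per_level_factors target_level (calculate_cumulative_factors per_level_factors target_level)

-- ===== LEMMAS AND PROOFS =====

-- map of getD over range(length) reproduces the list
theorem pv_map_getD_range (xs : List Int) (d : Int) :
    (List.range xs.length).map (fun i => xs.getD i d) = xs := by
  apply List.ext_getElem
  · simp
  · intro i h1 h2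
    simp [List.getD_eq_getElem?_getD, List.getElem?_eq_getElem h2]

-- A's inner loop: pointwise multiply the first n entries, written as map ++ untouched tail
theorem pv_inner (row : List Int) :
    ∀ (n : Nat) (cum : List Int), n ≤ cum.length →
    (List.range n).foldl (fun c i => c.set i (c.getD i 1 * row.getD i 0)) cum
      = (List.range n).map (fun i => cum.getD i 1 * row.getD i 0) ++ cum.drop n := by
  intro n
  induction n with
  | zero => simp
  | succ n ih =>
    intro cum h
    have hn : n < cum.length := by omega
    rw [List.range_succ, List.foldl_append, List.map_append, ih cum (by omega)]
    have hdrop : cum.drop n = cum[n] :: cum.drop (n + 1) := List.drop_eq_getElem_cons hn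
    simp only [List.foldl_cons, List.foldl_nil, hdrop]
    rw [List.getD_append_right _ _ _ _ (by simp), List.set_append_right _ _ (by simp)]
    simp [List.getD_eq_getElem?_getD, List.getElem?_eq_getElem hn]
    rw [hdrop, List.set_cons_zero]

-- A's outer loop over a list of rows
theorem pv_outer (rows : List (List Int)) :
    ∀ (cum : List Int) (n : Nat), cum.length = n →
    rows.foldl (fun c row => (List.range n).foldl
        (fun c i => c.set i (c.getD i 1 * row.getD i 0)) c) cum
      = (List.range n).map (fun i => cum.getD i 1 * (rows.map (fun r => r.getD i 0)).prod) := by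
  induction rows with
  | nil =>
    intro cum n h
    simp only [List.foldl_nil, List.map_nil, List.prod_nil, mul_one]
    rw [← h, pv_map_getD_range]
  | cons r rs ih =>
    intro cum n h
    rw [List.foldl_cons, pv_inner r n cum (by omega)]
    have hd : cum.drop n = [] := by simp [h]
    rw [hd, List.append_nil]
    rw [ih _ n (by simp)]
    apply List.ext_getElem
    · simp
    · intro i h1 h2
      simp only [List.getElem_map, List.getElem_range]
      have hi : i < n := by simpa using h1
      rw [List.getD_eq_getElem?_getD,
          List.getElem?_eq_getElem (by simpa using hi)]
      simp [mul_assoc]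

-- A's pyRange/pyGetD loop over the first k levels equals a foldl over take k
theorem pv_take_fold (pf : List (List Int)) (n : Nat) :
    ∀ (k : Nat), k ≤ pf.length → ∀ (cum : List Int),
    (PySem.List.pyRange 0 (k : Int) 1).foldl
        (fun cumulative level_idx =>
          (List.range n).foldl
            (fun cumulative dim_idx =>
              cumulative.set dim_idx
                (cumulative.getD dim_idx 1 *
                  (PySem.List.pyGetD pf level_idx []).getD dim_idx 0))
            cumulative)
        cum
      = (pf.take k).foldl
          (fun cumulative row =>
            (List.range n).foldl
              (fun cumulative dim_idx =>
                cumulative.set dim_idx (cumulative.getD dim_idx 1 * row.getD dim_idx 0))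
              cumulative)
          cum := by
  intro k
  induction k with
  | zero => simp [PySem.List.pyRange]
  | succ k ih =>
    intro hk cum
    have h1 : ((k : Int) : Int) + 1 = ((k + 1 : Nat) : Int) := by push_cast; ring
    rw [← h1, PySem.List.pyRange_one_succ_right (by positivity), List.foldl_append]
    rw [ih (by omega)]
    have hget : PySem.List.pyGetD pf (k : Int) [] = pf[k] := by
      rw [PySem.List.pyGetD_natCast]
      exact List.getD_eq_getElem _ _ (by omega)
    rw [List.take_succ_eq_append_getElem (show k < pf.length by omega), List.foldl_append]
    simp only [List.foldl_cons, List.foldl_nil, hget]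
    rfl

-- zipWith multiplication against a map over range, when the row is long enough
theorem pv_zipWith_map (g : Nat → Int) (row : List Int) (n : Nat) (h : n ≤ row.length) :
    List.zipWith (· * ·) ((List.range n).map g) row
      = (List.range n).map (fun i => g i * row.getD i 0) := by
  apply List.ext_getElem
  · simp; omega
  · intro i h1 h2
    have hi : i < n := by simpa using h2
    simp only [List.getElem_zipWith, List.getElem_map, List.getElem_range]
    rw [List.getD_eq_getElem?_getD, List.getElem?_eq_getElem (by omega)]
    rfl

-- characterization of B's recursion: column products of the first k rows
theorem pv_cum_eq (pf : List (List Int)) :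
    ∀ (k : Nat), 1 ≤ k → k ≤ pf.length →
    (∀ row ∈ pf.take k, (pf.headD []).length ≤ row.length) →
    pvCumulative pf k
      = (List.range (pf.headD []).length).map
          (fun i => ((pf.take k).map (fun r => r.getD i 0)).prod) := by
  intro k
  induction k with
  | zero => omega
  | succ k ih =>
    intro _ hk hrows
    cases k with
    | zero =>
      -- base: level 1, result is row 0
      obtain ⟨r, rs, rfl⟩ : ∃ r rs, pf = r :: rs := by
        cases pf with
        | nil => simp at hk
        | cons a l => exact ⟨a, l, rfl⟩
      simp only [pvCumulative, List.take_succ_cons, List.take_zero, List.map_cons,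
        List.map_nil, List.prod_cons, List.prod_nil, mul_one, List.headD]
      exact (pv_map_getD_range r 0).symm
    | succ m =>
      have hrows' : ∀ row ∈ pf.take (m + 1), (pf.headD []).length ≤ row.length := by
        intro row hr
        apply hrows
        apply List.take_subset (m + 1)
        rw [List.take_take]
        simpa using hr
      rw [show pvCumulative pf (m + 1 + 1)
            = List.zipWith (· * ·) (pvCumulative pf (m + 1)) (pf.getD (m + 1) []) from rfl,
        ih (by omega) (by omega) hrows']
      have hlt : m + 1 < pf.length := by omega
      have hget : pf.getD (m + 1) [] = pf[m + 1] := List.getD_eq_getElem _ _ hlt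
      have hlen : (pf.headD []).length ≤ pf[m + 1].length := by
        apply hrows
        rw [List.take_succ_eq_append_getElem hlt]
        exact List.mem_append_right _ (List.mem_singleton_self _)
      rw [hget, pv_zipWith_map _ _ _ hlen, List.take_succ_eq_append_getElem hlt]
      apply List.map_congr_left
      intro i _
      rw [List.map_append, List.prod_append]
      simp

-- ===== VERDICT (by name: the statement is the Claim_ definition above) =====
theorem calculate_cumulative_factors_spec : Claim_equal_calculate_cumulative_factors := by
  intro pf t _ hpre
  obtain ⟨h1, h2, h3⟩ := hpre
  obtain ⟨k, rfl⟩ : ∃ k : Nat, t = (k : Int) := ⟨t.toNat, by omega⟩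
  unfold Spec_calculate_cumulative_factors calculate_cumulative_factors calculate_cumulative_factors_alt
  rw [if_neg (by omega), if_neg (by omega), if_neg (by omega), if_neg (by omega)]
  have hkle : k ≤ pf.length := by exact_mod_cast h2
  have hk1 : 1 ≤ k := by exact_mod_cast h1
  have h3' : ∀ row ∈ pf.take k, (pf.headD []).length ≤ row.length := by
    intro row hr; exact h3 row (by simpa using hr)
  rw [pv_take_fold pf (pf.headD []).length k hkle,
      pv_outer (pf.take k) (List.replicate (pf.headD []).length 1) (pf.headD []).length (by simp)]
  rw [show ((k : Int)).toNat = k from rfl, pv_cum_eq pf k hk1 hkle h3']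
  apply List.map_congr_left
  intro i hi
  have hin : i < (pf.headD []).length := by simpa using hi
  have hin' : i < (pf.head?.getD []).length := by
    simpa [List.headD_eq_head?_getD] using hin
  rw [List.getD_eq_getElem?_getD, List.getElem?_replicate]
  simp [hin']
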